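-- pv_equiv track=rewrite | github.com/pypi-data/pypi-mirror-256 | packages/maplestory-py/maplestory_py-1.0.0.tar.gz/maplestory_py-1.0.0/maplestory/utils/number copy.py | korean_format_number
-- ===== SOURCE A (Python) =====
-- def korean_format_number(n: int) -> str:
--     """정수를 한글 형식으로 포맷팅된 문자열로 변환합니다.
--
--     인수:
--         n (int): 포맷팅할 정수입니다.
--
--     반환값:
--         str: 정수의 한글 형식으로 포맷팅된 문자열입니다.
--
--     예시:
--         >>> korean_format_number(12345)
--         '1만 2345'
--
--         >>> korean_format_number(27439263548400)
--         '27조 4392억 6354만 8400'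
--
--     참고:
--         이 함수는 정수를 1만 단위로 나누어 한글 형식으로 포맷팅된 문자열로 변환합니다. 사용되는 단위는 "만", "억", "조", "경"입니다.
--     """
--     """Converts an integer into a Korean formatted string representation.
--
--     Args:
--         n (int): The integer to be formatted.
--
--     Returns:
--         str: The Korean formatted string representation of the integer.
--
--     Example:
--         >>> korean_format_number(12345)
--         '1만 2345'
--
--         >>> korean_format_number(27439263548400)
--         '27조 4392억 6354만 8400'
--
--     Note:
--         This function converts an integer into a Korean formatted string representation by dividing the number into units of 10,000 and appending the corresponding unit name. The units used are "만" (10,000), "억" (100 million), "조" (1 trillion), and "경" (10 quadrillion).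
--     """
--
--     units = ["", "만", "억", "조", "경"]
--     result = []
--     unit_index = 0
--
--     while n > 0:
--         # 10000으로 나눈 나머지를 구하여 현재 단위의 숫자를 얻습니다.
--         part = n % 10000
--         if part > 0:  # 현재 단위의 값이 0이 아닌 경우에만 결과에 추가합니다.
--             result.insert(0, f"{part}{units[unit_index]}")
--         n //= 10000  # 다음 단위로 넘어갑니다.
--         unit_index += 1
--
--     return " ".join(result) if result else "0"
-- ===== SOURCE B (Python) =====
-- def korean_format_number(n: int) -> str:
--     """String-based re-implementation: split str(n) into 4-digit groups from the
--     right and emit non-zero groups most-significant first (idiomatic decomposition)."""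
--     if n <= 0:
--         return "0"
--     units = ["", "만", "억", "조", "경"]
--     s = str(n)
--     groups = []
--     while s:
--         groups.append(s[-4:])
--         s = s[:-4]
--     parts = []
--     for i in reversed(range(len(groups))):
--         g = groups[i].lstrip("0")
--         if g:
--             parts.append(g + units[i])
--     return " ".join(parts)
-- ===== Notes on version B (the rewrite author's own statement) =====
-- stated objective: idiomatic
-- what changed: B formats via the decimal string: str(n) is sliced into 4-char groups from the right and each non-zero group is emitted most-significant first after lstrip('0'), instead of A's while-loop that repeatedly divides n by 10000 and insert(0)s formatted remainders.
import Mathlib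
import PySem

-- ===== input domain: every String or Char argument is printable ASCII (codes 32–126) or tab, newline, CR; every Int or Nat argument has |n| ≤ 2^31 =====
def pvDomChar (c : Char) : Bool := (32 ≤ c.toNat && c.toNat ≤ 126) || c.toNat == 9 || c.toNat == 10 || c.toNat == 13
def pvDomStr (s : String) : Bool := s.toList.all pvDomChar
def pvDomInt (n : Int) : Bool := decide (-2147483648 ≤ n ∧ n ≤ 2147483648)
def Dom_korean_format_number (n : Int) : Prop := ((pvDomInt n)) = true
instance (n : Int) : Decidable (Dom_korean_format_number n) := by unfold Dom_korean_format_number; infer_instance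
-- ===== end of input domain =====

-- B formats via the decimal string (slice str(n) into 4-char groups from the right) instead of
-- A's repeated-division loop; equal return values on the whole domain (no speed claim).

-- ===== PORT A =====
-- units list of A (defined inside the Python function; lifted to the top level unchanged)
def pvUnitsA : List String := ["", "만", "억", "조", "경"]

-- termination helper for the loop of A (cited by name in decreasing_by)
theorem pvLoopA_dec (n : Int) (h : 0 < n) : (PySem.Int.floordiv n 10000).toNat < n.toNat := by
  have _h0 : (0:Int) ≤ PySem.Int.floordiv n 10000 :=
    (PySem.Int.le_floordiv_iff_mul_le (by omega)).mpr (by omega)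
  have h1 : PySem.Int.floordiv n 10000 < n :=
    (PySem.Int.floordiv_lt_iff_lt_mul (by omega)).mpr (by nlinarith)
  omega

-- the 'while n > 0' loop of A.  units[unit_index] is ported as pyGetD … "" : exact whenever
-- unit_index < 5, which holds for every n in Dom (Python raises IndexError only for n ≥ 10^20).
def pvLoopA (n : Int) (unit_index : Nat) (result : List String) : List String :=
  if h : 0 < n then
    let part := PySem.Int.mod n 10000
    let result' := if 0 < part then
        (PySem.Int.toStr part ++ PySem.List.pyGetD pvUnitsA (unit_index : Int) "") :: result
      else result
    pvLoopA (PySem.Int.floordiv n 10000) (unit_index + 1) result'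
  else result
termination_by n.toNat
decreasing_by exact pvLoopA_dec n h

def korean_format_number (n : Int) : String :=
  let result := pvLoopA n 0 []
  if result = [] then "0" else PySem.Str.join " " result

-- ===== PORT B =====
-- termination helper for the loop of B (cited by name in decreasing_by)
theorem pvChop_dec (s : List Char) (h : ¬ s = []) : (s.take (s.length - 4)).length < s.length := by
  have : s.length ≠ 0 := fun h0 => h (List.eq_nil_of_length_eq_zero h0)
  simp [List.length_take]; omega

-- the 'while s: groups.append(s[-4:]); s = s[:-4]' loop of B over the character list of str(n);
-- for non-empty s, s[-4:] = drop (len−4) s and s[:-4] = take (len−4) s (Nat subtraction), exact.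
def pvChop (s : List Char) : List (List Char) :=
  if h : s = [] then []
  else s.drop (s.length - 4) :: pvChop (s.take (s.length - 4))
termination_by s.length
decreasing_by exact pvChop_dec s h

-- g.lstrip("0") is dropWhile (· == '0') on the characters (exact); units[i] as pyGetD (see port A)
def korean_format_number_alt (n : Int) : String :=
  if n ≤ 0 then "0"
  else
    let units : List String := ["", "만", "억", "조", "경"]
    let groups := pvChop (PySem.Int.toChars n)
    let parts := ((List.range groups.length).reverse).foldl
      (fun parts (i : Nat) =>
        let g := (PySem.List.pyGetD groups (i : Int) []).dropWhile (· == '0')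
        if g ≠ [] then parts ++ [String.ofList g ++ PySem.List.pyGetD units (i : Int) ""]
        else parts) []
    PySem.Str.join " " parts

-- ===== PRECONDITION & SPEC =====
def Spec_korean_format_number (n : Int) (out : String) : Prop := out = korean_format_number_alt n
instance (n : Int) (out : String) : Decidable (Spec_korean_format_number n out) := by unfold Spec_korean_format_number; infer_instance

-- ===== CLAIM (what is proved, stated in full; the proofs are below) =====
def Claim_equal_korean_format_number : Prop := ∀ (n : Int), Dom_korean_format_number n → Spec_korean_format_number n (korean_format_number n)

-- ===== LEMMAS AND PROOFS =====

-- toDigitsCore: the accumulator is only appended to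
theorem pvTdcAcc (b : Nat) : ∀ (f n : Nat) (ds : List Char),
    Nat.toDigitsCore b f n ds = Nat.toDigitsCore b f n [] ++ ds := by
  intro f
  induction f with
  | zero => intro n ds; simp [Nat.toDigitsCore]
  | succ f ih =>
    intro n ds
    simp only [Nat.toDigitsCore]
    by_cases h : n / b = 0
    · simp [h]
    · simp only [h, if_false]
      rw [ih (n / b) (Nat.digitChar (n % b) :: ds), ih (n / b) [Nat.digitChar (n % b)]]
      simp

-- toDigitsCore: any sufficient fuel gives the same digits
theorem pvTdcFuel (b : Nat) (hb : 2 ≤ b) : ∀ (f g n : Nat) (ds : List Char),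
    n < f → n < g → Nat.toDigitsCore b f n ds = Nat.toDigitsCore b g n ds := by
  intro f
  induction f with
  | zero => intro g n ds hf; omega
  | succ f ih =>
    intro g n ds hf hg
    cases g with
    | zero => omega
    | succ g =>
      simp only [Nat.toDigitsCore]
      by_cases h : n / b = 0
      · simp [h]
      · simp only [h, if_false]
        have hn : 1 ≤ n := by
          rcases Nat.eq_zero_or_pos n with h0 | h0
          · exfalso; apply h; simp [h0]
          · omega
        have hd : n / b < n := Nat.div_lt_self hn hb
        exact ih g (n / b) _ (by omega) (by omega)

-- definitional unfoldings of Nat.toDigits / one step of Nat.toDigitsCore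
theorem pvToDigitsDef (n : Nat) : Nat.toDigits 10 n = Nat.toDigitsCore 10 (n + 1) n [] := rfl

theorem pvTdcSucc (b f n : Nat) (ds : List Char) :
    Nat.toDigitsCore b (f + 1) n ds =
      if n / b = 0 then Nat.digitChar (n % b) :: ds
      else Nat.toDigitsCore b f (n / b) (Nat.digitChar (n % b) :: ds) := rfl

-- one-digit numbers
theorem pvToDigitsLt10 (m : Nat) (h : m < 10) : Nat.toDigits 10 m = [Nat.digitChar m] := by
  rw [pvToDigitsDef, pvTdcSucc, if_pos (by omega), Nat.mod_eq_of_lt h]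

-- peeling the last digit
theorem pvToDigitsStep (a d : Nat) (ha : 1 ≤ a) (hd : d < 10) :
    Nat.toDigits 10 (a * 10 + d) = Nat.toDigits 10 a ++ [Nat.digitChar d] := by
  have hmod : (a * 10 + d) % 10 = d := by omega
  have hdiv : (a * 10 + d) / 10 = a := by omega
  rw [pvToDigitsDef, pvTdcSucc, hmod, hdiv, if_neg (by omega),
      pvTdcFuel 10 (by omega) (a * 10 + d) (a + 1) a _ (by omega) (by omega),
      pvTdcAcc 10 (a + 1) a [Nat.digitChar d], ← pvToDigitsDef]

-- the zero-padded 4-character group of r (0 ≤ r < 10000)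
def pvPad4 (r : Nat) : List Char :=
  [Nat.digitChar (r / 1000), Nat.digitChar (r / 100 % 10),
   Nat.digitChar (r / 10 % 10), Nat.digitChar (r % 10)]

set_option maxRecDepth 4096 in
theorem pvToDigitsGroup (q r : Nat) (hq : 1 ≤ q) (hr : r < 10000) :
    Nat.toDigits 10 (q * 10000 + r) = Nat.toDigits 10 q ++ pvPad4 r := by
  have e1 : q * 10000 + r = (q * 1000 + r / 10) * 10 + r % 10 := by omega
  have e2 : q * 1000 + r / 10 = (q * 100 + r / 100) * 10 + r / 10 % 10 := by omega
  have e3 : q * 100 + r / 100 = (q * 10 + r / 1000) * 10 + r / 100 % 10 := by omega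
  rw [e1, pvToDigitsStep _ _ (by omega) (by omega),
      e2, pvToDigitsStep _ _ (by omega) (by omega),
      e3, pvToDigitsStep _ _ (by omega) (by omega),
      pvToDigitsStep q (r / 1000) hq (by omega)]
  simp [pvPad4]

-- digits of a positive number start with a non-'0' character
theorem pvToDigitsHead (m : Nat) (hm : 1 ≤ m) :
    ∃ c t, Nat.toDigits 10 m = c :: t ∧ (c == '0') = false := by
  induction m using Nat.strong_induction_on with
  | _ m ih =>
    by_cases h : m < 10
    · refine ⟨Nat.digitChar m, [], by rw [pvToDigitsLt10 m h], ?_⟩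
      interval_cases m <;> decide
    · have e : m = (m / 10) * 10 + m % 10 := by omega
      have h1 : 1 ≤ m / 10 := by omega
      obtain ⟨c, t, ht, hc⟩ := ih (m / 10) (by omega) h1
      refine ⟨c, t ++ [Nat.digitChar (m % 10)], ?_, hc⟩
      rw [e, pvToDigitsStep _ _ h1 (by omega), ht]; simp

theorem pvStripToDigits (m : Nat) (hm : 1 ≤ m) :
    (Nat.toDigits 10 m).dropWhile (· == '0') = Nat.toDigits 10 m := by
  obtain ⟨c, t, ht, hc⟩ := pvToDigitsHead m hm
  rw [ht, List.dropWhile_cons_of_neg (by simp [hc])]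

theorem pvToDigitsNeNil (m : Nat) (hm : 1 ≤ m) : Nat.toDigits 10 m ≠ [] := by
  obtain ⟨c, t, ht, _⟩ := pvToDigitsHead m hm
  simp [ht]

theorem pvDigitCharNeZero (k : Nat) (h1 : 1 ≤ k) (h2 : k < 10) :
    (Nat.digitChar k == '0') = false := by
  interval_cases k <;> decide

-- stripping the leading zeros of a padded group recovers the digits of its value
theorem pvStripPad4 (r : Nat) (hr : r < 10000) :
    (pvPad4 r).dropWhile (· == '0') = if r = 0 then [] else Nat.toDigits 10 r := by
  have hz : (Nat.digitChar 0 == '0') = true := by decide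
  by_cases h0 : r = 0
  · subst h0; decide
  · simp only [h0, if_false]
    by_cases h1 : r < 10
    · have ha : r / 1000 = 0 := by omega
      have hb : r / 100 % 10 = 0 := by omega
      have hc : r / 10 % 10 = 0 := by omega
      have hd : r % 10 = r := by omega
      have hne := pvDigitCharNeZero r (by omega) h1
      rw [pvToDigitsLt10 r h1]
      simp [pvPad4, ha, hb, hc, hd, hz, hne]
    · by_cases h2 : r < 100
      · have ha : r / 1000 = 0 := by omega
        have hb : r / 100 % 10 = 0 := by omega
        have hc : r / 10 % 10 = r / 10 := by omega
        have e : r = (r / 10) * 10 + r % 10 := by omega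
        have hne := pvDigitCharNeZero (r / 10) (by omega) (by omega)
        conv_rhs => rw [e, pvToDigitsStep _ _ (by omega) (by omega),
          pvToDigitsLt10 (r / 10) (by omega)]
        simp [pvPad4, ha, hb, hc, hz, hne]
      · by_cases h3 : r < 1000
        · have ha : r / 1000 = 0 := by omega
          have hb : r / 100 % 10 = r / 100 := by omega
          have e1 : r = (r / 10) * 10 + r % 10 := by omega
          have e2 : r / 10 = (r / 100) * 10 + r / 10 % 10 := by omega
          have hne := pvDigitCharNeZero (r / 100) (by omega) (by omega)
          conv_rhs => rw [e1, pvToDigitsStep _ _ (by omega) (by omega), e2,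
            pvToDigitsStep _ _ (by omega) (by omega),
            pvToDigitsLt10 (r / 100) (by omega)]
          simp [pvPad4, ha, hb, hz, hne]
        · have e1 : r = (r / 10) * 10 + r % 10 := by omega
          have e2 : r / 10 = (r / 100) * 10 + r / 10 % 10 := by omega
          have e3 : r / 100 = (r / 1000) * 10 + r / 100 % 10 := by omega
          have hne := pvDigitCharNeZero (r / 1000) (by omega) (by omega)
          conv_rhs => rw [e1, pvToDigitsStep _ _ (by omega) (by omega), e2,
            pvToDigitsStep _ _ (by omega) (by omega), e3,
            pvToDigitsStep _ _ (by omega) (by omega),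
            pvToDigitsLt10 (r / 1000) (by omega)]
          simp [pvPad4, hz, hne]

-- pvChop on short inputs and on a 4-character suffix
theorem pvChopSmall (s : List Char) (h1 : s ≠ []) (h2 : s.length ≤ 4) : pvChop s = [s] := by
  rw [pvChop]
  have e : s.length - 4 = 0 := by omega
  simp [h1, e, pvChop]

theorem pvChopAppend (t p : List Char) (hp : p.length = 4) :
    pvChop (t ++ p) = p :: pvChop t := by
  rw [pvChop]
  have hne : t ++ p ≠ [] := by
    intro h; have := congrArg List.length h; simp [hp] at this
  have e : (t ++ p).length - 4 = t.length := by simp [hp]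
  simp only [hne, dif_neg, not_false_iff, e]
  rw [List.drop_left, List.take_left]

-- the common shape of both results: groups of m, most significant first, zeros skipped
theorem pvCanon_dec (m : Nat) (h : 1 ≤ m) : m / 10000 < m := by omega

def pvCanon (m : Nat) (idx : Nat) : List String :=
  if _h : 1 ≤ m then
    pvCanon (m / 10000) (idx + 1) ++
      (if m % 10000 ≠ 0 then
        [PySem.Int.toStr ((m % 10000 : Nat) : Int) ++ PySem.List.pyGetD pvUnitsA (idx : Int) ""]
      else [])
  else []
termination_by m
decreasing_by exact pvCanon_dec m _h

theorem pvCanonNeNil (m : Nat) (hm : 1 ≤ m) : ∀ idx, pvCanon m idx ≠ [] := by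
  induction m using Nat.strong_induction_on with
  | _ m ih =>
    intro idx
    rw [pvCanon]
    simp only [hm, dif_pos]
    by_cases h : m % 10000 ≠ 0
    · simp [h]
    · have h1 : 1 ≤ m / 10000 := by omega
      have := ih (m / 10000) (by omega) h1 (idx + 1)
      simp [h, this]

-- A's loop computes pvCanon (on top of its accumulator)
theorem pvLoopAEq (m : Nat) : ∀ (idx : Nat) (acc : List String),
    pvLoopA (m : Int) idx acc = pvCanon m idx ++ acc := by
  induction m using Nat.strong_induction_on with
  | _ m ih =>
    intro idx acc
    by_cases hm : 1 ≤ m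
    · rw [pvLoopA, pvCanon]
      have hpos : (0 : Int) < (m : Int) := by exact_mod_cast hm
      have hmod : PySem.Int.mod (m : Int) 10000 = ((m % 10000 : Nat) : Int) := by
        rw [PySem.Int.mod, Int.fmod_eq_emod, if_pos (Or.inl (by omega))]; omega
      have hdiv : PySem.Int.floordiv (m : Int) 10000 = ((m / 10000 : Nat) : Int) := by
        rw [PySem.Int.floordiv, Int.fdiv_eq_ediv, if_pos (Or.inl (by omega))]; omega
      have hih := ih (m / 10000) (by omega)
      rw [dif_pos hpos, dif_pos hm]
      simp only [hmod, hdiv]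
      rw [hih]
      by_cases hp : m % 10000 = 0
      · rw [if_neg (show ¬ (0 : Int) < ((m % 10000 : Nat) : Int) by omega),
            if_neg (show ¬ m % 10000 ≠ 0 by omega), List.append_nil]
      · rw [if_pos (show (0 : Int) < ((m % 10000 : Nat) : Int) by omega),
            if_pos hp, List.append_assoc]
        rfl
    · have h0 : m = 0 := by omega
      subst h0
      rw [pvLoopA, pvCanon]; simp

-- B's per-group emission, most significant group first
def pvBspec : List (List Char) → Nat → List String
  | [], _ => []
  | g :: gs, idx =>
    pvBspec gs (idx + 1) ++
      (if g.dropWhile (· == '0') ≠ [] then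
        [String.ofList (g.dropWhile (· == '0')) ++ PySem.List.pyGetD pvUnitsA (idx : Int) ""]
      else [])

theorem pvBspecSnoc (g : List Char) : ∀ (gs : List (List Char)) (idx : Nat),
    pvBspec (gs ++ [g]) idx =
      (if g.dropWhile (· == '0') ≠ [] then
        [String.ofList (g.dropWhile (· == '0')) ++ PySem.List.pyGetD pvUnitsA ((idx + gs.length : Nat) : Int) ""]
      else []) ++ pvBspec gs idx := by
  intro gs
  induction gs with
  | nil =>
    intro idx
    simp only [pvBspec, List.nil_append, List.append_nil, List.length_nil, Nat.add_zero]
  | cons h t iht =>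
    intro idx
    simp only [List.cons_append, pvBspec, iht (idx + 1)]
    have e : idx + 1 + t.length = idx + (t.length + 1) := by omega
    simp [e, List.append_assoc]

-- B's fold, characterised: first as a filterMap …
theorem pvFoldlPush (C : Nat → Prop) [DecidablePred C] (H : Nat → String) :
    ∀ (l : List Nat) (acc : List String),
    l.foldl (fun a i => if C i then a ++ [H i] else a) acc =
      acc ++ l.filterMap (fun i => if C i then some (H i) else none) := by
  intro l
  induction l with
  | nil => intro acc; simp
  | cons x xs ih =>
    intro acc
    simp only [List.foldl_cons, List.filterMap_cons]
    by_cases h : C x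
    · simp [h, ih]
    · simp [h, ih]

-- … then the reversed-range filterMap is pvBspec
theorem pvRangeRev : ∀ (gs : List (List Char)),
    ((List.range gs.length).reverse).filterMap
      (fun (i : Nat) =>
        if ((PySem.List.pyGetD gs (i : Int) []).dropWhile (· == '0')) ≠ [] then
          some (String.ofList ((PySem.List.pyGetD gs (i : Int) []).dropWhile (· == '0')) ++
                PySem.List.pyGetD pvUnitsA (i : Int) "")
        else none) = pvBspec gs 0 := by
  intro gs
  induction gs using List.reverseRecOn with
  | nil => simp [pvBspec]
  | append_singleton gs g ih =>
    rw [List.length_append, List.length_singleton, List.range_succ, List.reverse_append]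
    rw [List.reverse_singleton, List.singleton_append, List.filterMap_cons]
    have hget : PySem.List.pyGetD (gs ++ [g]) ((gs.length : Nat) : Int) [] = g := by
      simp [PySem.List.pyGetD_natCast, List.getD]
    have hrest : ∀ i ∈ (List.range gs.length).reverse,
        PySem.List.pyGetD (gs ++ [g]) ((i : Nat) : Int) [] = PySem.List.pyGetD gs (i : Int) [] := by
      intro i hi
      rw [List.mem_reverse, List.mem_range] at hi
      simp [PySem.List.pyGetD_natCast, List.getD, List.getElem?_append_left hi]
    rw [List.filterMap_congr (fun i hi => by rw [hrest i hi]), ih, pvBspecSnoc g gs 0, hget]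
    by_cases h : (g.dropWhile (· == '0')) ≠ []
    · rw [if_pos h, if_pos h, Nat.zero_add]; rfl
    · rw [if_neg h, if_neg h]; rfl

-- B's groups of str(m) emit pvCanon
theorem pvBspecEq (m : Nat) (hm : 1 ≤ m) : ∀ idx,
    pvBspec (pvChop (Nat.toDigits 10 m)) idx = pvCanon m idx := by
  induction m using Nat.strong_induction_on with
  | _ m ih =>
    intro idx
    by_cases h : m < 10000
    · have hlen : (Nat.toDigits 10 m).length ≤ 4 :=
        Nat.toDigits_length 10 m 4 (by omega) (by omega)
      rw [pvChopSmall _ (pvToDigitsNeNil m hm) hlen]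
      rw [pvCanon]
      have h1 : m % 10000 = m := by omega
      have h2 : m / 10000 = 0 := by omega
      simp only [pvBspec, hm, dif_pos, h1, h2]
      rw [pvCanon]
      have hstrip := pvStripToDigits m hm
      have hne := pvToDigitsNeNil m hm
      have htostr : PySem.Int.toStr ((m : Nat) : Int) = String.ofList (Nat.toDigits 10 m) := by
        unfold PySem.Int.toStr PySem.Int.toChars
        rw [if_neg (by omega)]
        rfl
      simp [hstrip, hne, htostr, show m ≠ 0 by omega]
    · have hq : 1 ≤ m / 10000 := by omega
      have hr : m % 10000 < 10000 := by omega
      have e : m = (m / 10000) * 10000 + m % 10000 := by omega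
      have hd : Nat.toDigits 10 m = Nat.toDigits 10 (m / 10000) ++ pvPad4 (m % 10000) := by
        conv_lhs => rw [e]
        exact pvToDigitsGroup _ _ hq hr
      rw [hd, pvChopAppend _ _ (by simp [pvPad4]), pvCanon]
      simp only [pvBspec, hm, dif_pos]
      rw [ih (m / 10000) (by omega) hq (idx + 1)]
      rw [pvStripPad4 (m % 10000) hr]
      by_cases hz : m % 10000 = 0
      · simp [hz]
      · have hne := pvToDigitsNeNil (m % 10000) (by omega)
        have htostr : PySem.Int.toStr ((m % 10000 : Nat) : Int) =
            String.ofList (Nat.toDigits 10 (m % 10000)) := by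
          unfold PySem.Int.toStr PySem.Int.toChars
          rw [if_neg (by omega)]
          rfl
        have htostr2 : PySem.Int.toStr ((m : Int) % 10000) =
            String.ofList (Nat.toDigits 10 (m % 10000)) := by
          unfold PySem.Int.toStr PySem.Int.toChars
          rw [if_neg (by omega)]
          have hc : ((m : Int) % 10000).toNat = m % 10000 := by omega
          rw [hc]
        simp [hz, hne, htostr2]

-- B on positive input, through the two fold characterisations
theorem pvAltPos (n : Int) (hpos : 0 < n) :
    korean_format_number_alt n =
      PySem.Str.join " " (pvBspec (pvChop (PySem.Int.toChars n)) 0) := by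
  have hn : ¬ n ≤ 0 := by omega
  simp only [korean_format_number_alt, hn, if_false]
  rw [pvFoldlPush
        (fun (i : Nat) => ((PySem.List.pyGetD (pvChop (PySem.Int.toChars n)) (i : Int) []).dropWhile (· == '0')) ≠ [])
        (fun (i : Nat) => String.ofList ((PySem.List.pyGetD (pvChop (PySem.Int.toChars n)) (i : Int) []).dropWhile (· == '0')) ++
          PySem.List.pyGetD ["", "만", "억", "조", "경"] (i : Int) "")]
  rw [show (["", "만", "억", "조", "경"] : List String) = pvUnitsA from rfl]
  rw [pvRangeRev (pvChop (PySem.Int.toChars n))]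
  simp

-- ===== VERDICT (by name: the statement is the Claim_ definition above) =====
theorem korean_format_number_spec : Claim_equal_korean_format_number := by
  intro n _
  unfold Spec_korean_format_number
  by_cases hn : n ≤ 0
  · have hloop : pvLoopA n 0 [] = [] := by
      rw [pvLoopA]; simp [show ¬ (0:Int) < n by omega]
    simp [korean_format_number, korean_format_number_alt, hloop, hn]
  · have hpos : 0 < n := by omega
    set m : Nat := n.toNat with hm
    have hcast : (m : Int) = n := by omega
    have hm1 : 1 ≤ m := by omega
    have hA : pvLoopA n 0 [] = pvCanon m 0 := by
      rw [← hcast, pvLoopAEq m 0 []]; simp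
    have hchars : PySem.Int.toChars n = Nat.toDigits 10 m := by
      rw [← hcast]; simp [PySem.Int.toChars]
    rw [pvAltPos n hpos, hchars, pvBspecEq m hm1 0]
    have hne := pvCanonNeNil m hm1 0
    simp [korean_format_number, hA, hne]
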